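-- pv_equiv track=rewrite | github.com/esehehelp/new-ime | models/src/eval/ctc_nat_backend.py | _merge_with_overlap
-- ===== SOURCE A (Python) =====
-- def _merge_with_overlap(
--     pieces: list[str],
--     max_overlap: int,
-- ) -> str:
--     """Stitch sequentially-decoded chunks by longest suffix/prefix match.
--
--     Greedy: for each new piece, find the longest suffix of the current
--     result that equals the prefix of the new piece, up to
--     ``max_overlap`` characters, then append only the non-overlapping
--     tail. A match of zero length just concatenates (same as naive
--     non-overlapping chunking).
--
--     The algorithm is O(sum(len) * max_overlap). For our sizes this is
--     negligible compared to the per-chunk decode.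
--     """
--     if not pieces:
--         return ""
--     merged = pieces[0]
--     for nxt in pieces[1:]:
--         if not nxt:
--             continue
--         upper = min(len(merged), len(nxt), max_overlap)
--         match = 0
--         # Longest L such that merged endswith nxt[:L].
--         for L in range(upper, 0, -1):
--             if merged.endswith(nxt[:L]):
--                 match = L
--                 break
--         merged += nxt[match:]
--     return merged
-- ===== SOURCE B (Python) =====
-- def _kmp_border(s: str) -> int:
--     """Longest proper border of s (prefix == suffix), via the KMP prefix function."""
--     pi = [0] * len(s)
--     k = 0
--     for i in range(1, len(s)):
--         while k > 0 and s[i] != s[k]: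
--             k = pi[k - 1]
--         if s[i] == s[k]:
--             k += 1
--         pi[i] = k
--     return pi[-1] if s else 0
--
--
-- def _merge_with_overlap(
--     pieces: list[str],
--     max_overlap: int,
-- ) -> str:
--     """Stitch chunks by longest suffix/prefix overlap up to max_overlap,
--     finding each overlap with a KMP prefix-function over pattern+sentinel+tail."""
--     if not pieces:
--         return ""
--     merged = pieces[0]
--     for nxt in pieces[1:]:
--         if not nxt:
--             continue
--         upper = min(len(merged), len(nxt), max_overlap)
--         if upper > 0:
--             k = _kmp_border(nxt[:upper] + "\x00" + merged[len(merged) - upper:])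
--         else:
--             k = 0
--         merged += nxt[k:]
--     return merged
-- ===== Notes on version B (the rewrite author's own statement) =====
-- stated objective: alternative
-- what changed: B computes each overlap as the longest border of nxt[:upper] + '\x00' sentinel + the length-upper tail of merged via the KMP prefix function, replacing A's descending scan that re-tests every candidate prefix with endswith.
import Mathlib
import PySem

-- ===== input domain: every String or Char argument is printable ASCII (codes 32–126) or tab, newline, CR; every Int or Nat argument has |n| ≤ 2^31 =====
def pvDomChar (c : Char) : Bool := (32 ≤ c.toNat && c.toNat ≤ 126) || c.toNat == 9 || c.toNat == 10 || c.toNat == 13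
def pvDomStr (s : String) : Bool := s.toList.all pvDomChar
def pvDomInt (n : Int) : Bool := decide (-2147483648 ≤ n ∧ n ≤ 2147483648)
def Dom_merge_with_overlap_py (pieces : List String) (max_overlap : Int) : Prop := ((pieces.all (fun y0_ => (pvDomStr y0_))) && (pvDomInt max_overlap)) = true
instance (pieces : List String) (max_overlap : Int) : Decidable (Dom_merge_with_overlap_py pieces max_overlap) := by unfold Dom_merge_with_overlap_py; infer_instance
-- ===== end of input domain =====

-- B finds each overlap with a KMP prefix-function over pattern+sentinel+tail instead of
-- A's descending scan of candidate overlap lengths (objective: alternative; not measured faster).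

-- ===== PORT A =====
-- inner loop: 'for L in range(upper, 0, -1): if merged.endswith(nxt[:L]): match = L; break'
def pvAFind (merged nxt : List Char) : List Int → Int
  | [] => 0
  | L :: rest =>
      if PySem.Chars.endswith merged (PySem.Chars.slice nxt none (some L)) then L
      else pvAFind merged nxt rest

-- one iteration of A's 'for nxt in pieces[1:]' body
def pvAStep (max_overlap : Int) (merged nxt : List Char) : List Char :=
  if nxt = [] then merged
  else
    let upper := min (min (merged.length : Int) (nxt.length : Int)) max_overlap
    let m := pvAFind merged nxt (PySem.List.pyRange upper 0 (-1))
    merged ++ PySem.Chars.slice nxt (some m) none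

def merge_with_overlap_py (pieces : List String) (max_overlap : Int) : String :=
  match pieces with
  | [] => ""
  | p :: rest =>
      String.ofList ((rest.map String.toList).foldl (fun merged nxt => pvAStep max_overlap merged nxt) p.toList)

-- ===== PORT B =====
-- the sentinel "\x00" Source B places between pattern and tail
def pvSep : Char := Char.ofNat 0

-- 'while k > 0 and s[i] != s[k]: k = pi[k - 1]'  (c is s[i]; fuel only makes the
-- recursion structural — it is started at k and k strictly decreases, so it never runs out)
def pvChase (s : List Char) (pi : List Nat) (c : Char) : Nat → Nat → Nat
  | 0, k => k
  | fuel + 1, k =>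
      if 0 < k ∧ ¬(c = s.getD k ' ') then pvChase s pi c fuel (pi.getD (k - 1) 0) else k

-- one iteration of 'for i in range(1, len(s))' in _kmp_border; Python preallocates pi and
-- fills it left to right, ported as the list of already-filled entries (reads are identical)
def pvKmpStep (s : List Char) (st : List Nat × Nat) (i : Nat) : List Nat × Nat :=
  let c := s.getD i ' '
  let k0 := pvChase s st.1 c st.2 st.2
  let k := if c = s.getD k0 ' ' then k0 + 1 else k0
  (st.1 ++ [k], k)

-- '_kmp_border(s)': prefix function, returns pi[-1] (0 for empty s)
def pvKmpBorder (s : List Char) : Nat :=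
  if s.isEmpty then 0
  else (((List.range' 1 (s.length - 1)).foldl (pvKmpStep s) ([0], 0)).1).getLastD 0

-- one iteration of B's 'for nxt in pieces[1:]' body
def pvBStep (max_overlap : Int) (merged nxt : List Char) : List Char :=
  if nxt = [] then merged
  else
    let upper := min (min (merged.length : Int) (nxt.length : Int)) max_overlap
    let k : Nat :=
      if 0 < upper then
        pvKmpBorder (PySem.Chars.slice nxt none (some upper) ++
          pvSep :: PySem.Chars.slice merged (some ((merged.length : Int) - upper)) none)
      else 0
    merged ++ PySem.Chars.slice nxt (some (k : Int)) none

def merge_with_overlap_py_alt (pieces : List String) (max_overlap : Int) : String :=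
  match pieces with
  | [] => ""
  | p :: rest =>
      String.ofList ((rest.map String.toList).foldl (fun merged nxt => pvBStep max_overlap merged nxt) p.toList)

-- ===== PRECONDITION & SPEC =====
def Spec_merge_with_overlap_py (pieces : List String) (max_overlap : Int) (out : String) : Prop := out = merge_with_overlap_py_alt pieces max_overlap
instance (pieces : List String) (max_overlap : Int) (out : String) : Decidable (Spec_merge_with_overlap_py pieces max_overlap out) := by unfold Spec_merge_with_overlap_py; infer_instance

-- ===== CLAIM (what is proved, stated in full; the proofs are below) =====
def Claim_equal_merge_with_overlap_py : Prop := ∀ (pieces : List String) (max_overlap : Int), Dom_merge_with_overlap_py pieces max_overlap → Spec_merge_with_overlap_py pieces max_overlap (merge_with_overlap_py pieces max_overlap)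

-- ===== LEMMAS AND PROOFS =====

-- j is a border length of the prefix of s of length n
abbrev pvBord (s : List Char) (n j : Nat) : Prop := j < n ∧ s.take j <:+ s.take n

-- longest border of the prefix of s of length n
def pvMB (s : List Char) (n : Nat) : Nat := Nat.findGreatest (pvBord s n) (n - 1)

theorem pvBord_zero {s : List Char} {n : Nat} (h : 0 < n) : pvBord s n 0 :=
  ⟨h, by simp⟩

theorem pvBord_trans {s : List Char} {n k j : Nat} (hj : pvBord s k j) (hk : pvBord s n k) :
    pvBord s n j := ⟨hj.1.trans hk.1, hj.2.trans hk.2⟩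

theorem pvBord_nested {s : List Char} {n j k : Nat} (hj : pvBord s n j) (hk : pvBord s n k)
    (hlt : j < k) : pvBord s k j :=
  ⟨hlt, List.suffix_of_suffix_length_le hj.2 hk.2 (by simp [List.length_take]; omega)⟩

theorem pvMB_le {s : List Char} {n : Nat} : pvMB s n ≤ n - 1 := Nat.findGreatest_le _

theorem pvMB_bord {s : List Char} {n : Nat} (h : 0 < n) : pvBord s n (pvMB s n) :=
  Nat.findGreatest_spec (Nat.zero_le _) (pvBord_zero h)

theorem pvMB_ge {s : List Char} {n j : Nat} (h : pvBord s n j) : j ≤ pvMB s n :=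
  Nat.le_findGreatest (by omega) h

theorem pv_suffix_concat_iff {u t : List Char} {a b : Char} :
    u ++ [b] <:+ t ++ [a] ↔ u <:+ t ∧ b = a := by
  rw [← List.reverse_prefix, ← List.reverse_prefix (l₁ := u)]
  constructor
  · intro h
    have h' : b :: u.reverse <+: a :: t.reverse := by simpa using h
    rw [List.cons_prefix_cons] at h'
    exact ⟨h'.2, h'.1⟩
  · intro ⟨h1, h2⟩
    have : b :: u.reverse <+: a :: t.reverse := List.cons_prefix_cons.mpr ⟨h2, h1⟩
    simpa using this

theorem pv_take_succ {s : List Char} {i : Nat} (h : i < s.length) :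
    s.take (i + 1) = s.take i ++ [s.getD i ' '] := by
  rw [List.getD_eq_getElem _ _ h, List.take_add_one, List.getElem?_eq_getElem h]
  rfl

theorem pvBord_succ_iff {s : List Char} {i j : Nat} (hi : i < s.length) (hj : j < i) :
    pvBord s (i + 1) (j + 1) ↔ pvBord s i j ∧ s.getD j ' ' = s.getD i ' ' := by
  have hji : j < s.length := hj.trans hi
  unfold pvBord
  rw [pv_take_succ hi, pv_take_succ hji, pv_suffix_concat_iff]
  constructor
  · rintro ⟨-, h2, h3⟩
    exact ⟨⟨hj, h2⟩, h3⟩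
  · rintro ⟨⟨-, h2⟩, h3⟩
    exact ⟨by omega, h2, h3⟩

theorem pvBord_succ_cases {s : List Char} {i : Nat} (hi : i < s.length) (h1 : 1 ≤ i) (m : Nat) :
    pvBord s (i + 1) m ↔
      m = 0 ∨ ∃ j, m = j + 1 ∧ j < i ∧ pvBord s i j ∧ s.getD j ' ' = s.getD i ' ' := by
  constructor
  · intro hb
    match m, hb with
    | 0, _ => exact Or.inl rfl
    | (j+1), hb =>
        have hji : j < i := by have := hb.1; omega
        have := (pvBord_succ_iff hi hji).mp hb
        exact Or.inr ⟨j, rfl, hji, this.1, this.2⟩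
  · rintro (rfl | ⟨j, rfl, hji, hb, hc⟩)
    · exact pvBord_zero (by omega)
    · exact (pvBord_succ_iff hi hji).mpr ⟨hb, hc⟩

theorem pvChase_spec (s : List Char) (pi : List Nat) (c : Char) (i : Nat)
    (hpi : ∀ j, j + 1 < i → pi.getD j 0 = pvMB s (j + 1)) :
    ∀ fuel k, k ≤ fuel → pvBord s i k → (∀ j, pvBord s i j → s.getD j ' ' = c → j ≤ k) →
      pvBord s i (pvChase s pi c fuel k) ∧
      (s.getD (pvChase s pi c fuel k) ' ' = c ∨ pvChase s pi c fuel k = 0) ∧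
      (∀ j, pvBord s i j → s.getD j ' ' = c → j ≤ pvChase s pi c fuel k) := by
  intro fuel
  induction fuel with
  | zero =>
      intro k hk hb hdom
      have : k = 0 := by omega
      subst this
      exact ⟨hb, Or.inr rfl, hdom⟩
  | succ fuel ih =>
      intro k hk hb hdom
      by_cases hcond : 0 < k ∧ ¬(c = s.getD k ' ')
      · obtain ⟨hk0, hne⟩ := hcond
        have hki : k < i := hb.1
        have hpik : pi.getD (k - 1) 0 = pvMB s k := by
          have := hpi (k - 1) (by omega)
          have hkk : k - 1 + 1 = k := by omega
          rwa [hkk] at this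
        have hb' : pvBord s i (pvMB s k) := by
          rcases Nat.eq_zero_or_pos (pvMB s k) with h0 | hpos
          · rw [h0]; exact pvBord_zero (by omega)
          · exact pvBord_trans (pvMB_bord hk0) hb
        have hfuel : pvMB s k ≤ fuel := by
          have := pvMB_le (s := s) (n := k)
          omega
        have hdom' : ∀ j, pvBord s i j → s.getD j ' ' = c → j ≤ pvMB s k := by
          intro j hj hc
          have hjk : j ≤ k := hdom j hj hc
          have hjne : j ≠ k := by
            intro e; subst e; exact hne hc.symm
          exact pvMB_ge (pvBord_nested hj hb (by omega))
        have hstep : pvChase s pi c (fuel + 1) k = pvChase s pi c fuel (pi.getD (k - 1) 0) := by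
          simp only [pvChase, if_pos (And.intro hk0 hne)]
        rw [hstep, hpik]
        exact ih (pvMB s k) hfuel hb' hdom'
      · have hstep : pvChase s pi c (fuel + 1) k = k := by
          simp only [pvChase, if_neg hcond]
        rw [hstep]
        refine ⟨hb, ?_, hdom⟩
        rcases Nat.eq_zero_or_pos k with h0 | hpos
        · exact Or.inr h0
        · have hc : c = s.getD k ' ' := by
            by_contra hne
            exact hcond ⟨hpos, hne⟩
          exact Or.inl hc.symm

theorem pvKmpStep_inv (s : List Char) (i : Nat) (h1 : 1 ≤ i) (hi : i < s.length)
    (pi : List Nat) (k : Nat) (hlen : pi.length = i)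
    (hpi : ∀ j, j < i → pi.getD j 0 = pvMB s (j + 1)) (hk : k = pvMB s i) :
    (pvKmpStep s (pi, k) i).1.length = i + 1 ∧
    (∀ j, j < i + 1 → (pvKmpStep s (pi, k) i).1.getD j 0 = pvMB s (j + 1)) ∧
    (pvKmpStep s (pi, k) i).2 = pvMB s (i + 1) := by
  set c := s.getD i ' ' with hc
  have hpi' : ∀ j, j + 1 < i → pi.getD j 0 = pvMB s (j + 1) := fun j hj => hpi j (by omega)
  have hb : pvBord s i k := hk ▸ pvMB_bord (by omega)
  have hdom : ∀ j, pvBord s i j → s.getD j ' ' = c → j ≤ k := fun j hj _ => hk ▸ pvMB_ge hj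
  obtain ⟨hr1, hr2, hr3⟩ := pvChase_spec s pi c i hpi' k k le_rfl hb hdom
  set r := pvChase s pi c k k with hrdef
  have hkey : (if c = s.getD r ' ' then r + 1 else r) = pvMB s (i + 1) := by
    by_cases hcc : c = s.getD r ' '
    · rw [if_pos hcc]
      symm
      unfold pvMB
      rw [show i + 1 - 1 = i from rfl, Nat.findGreatest_eq_iff]
      refine ⟨by have := hr1.1; omega, fun _ => ?_, ?_⟩
      · exact (pvBord_succ_iff hi hr1.1).mpr ⟨hr1, by rw [← hcc, hc]⟩
      · intro m hgt hle hB
        rcases (pvBord_succ_cases hi h1 m).mp hB with rfl | ⟨j, rfl, hji, hbj, hcj⟩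
        · omega
        · have := hr3 j hbj (by rw [hcj, ← hc])
          omega
    · rw [if_neg hcc]
      have hr0 : r = 0 := by
        rcases hr2 with h | h
        · exact absurd h.symm hcc
        · exact h
      rw [hr0]
      symm
      unfold pvMB
      rw [show i + 1 - 1 = i from rfl, Nat.findGreatest_eq_iff]
      refine ⟨Nat.zero_le _, fun h0 => absurd rfl h0, ?_⟩
      intro m hgt hle hB
      rcases (pvBord_succ_cases hi h1 m).mp hB with rfl | ⟨j, rfl, hji, hbj, hcj⟩
      · omega
      · have hj0 : j = 0 := by
          have := hr3 j hbj (by rw [hcj, ← hc])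
          omega
        subst hj0
        apply hcc
        rw [hr0, hc, ← hcj]
  have hstep : pvKmpStep s (pi, k) i = (pi ++ [pvMB s (i + 1)], pvMB s (i + 1)) := by
    simp only [pvKmpStep]
    rw [← hc, ← hrdef, hkey]
  rw [hstep]
  refine ⟨by simp [hlen], ?_, rfl⟩
  intro j hj
  rcases Nat.lt_or_ge j i with hji | hji
  · rw [List.getD_append _ _ _ _ (by omega : j < pi.length)]
    exact hpi j hji
  · have hje : j = i := by omega
    subst hje
    rw [List.getD_eq_getElem _ _ (by simp [hlen] : j < (pi ++ [pvMB s (j + 1)]).length)]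
    rw [List.getElem_append_right (by omega)]
    simp [hlen]

theorem pvKmp_fold (s : List Char) (hs : 1 ≤ s.length) :
    ∀ m, m ≤ s.length - 1 →
      ((List.range' 1 m).foldl (pvKmpStep s) ([0], 0)).1.length = m + 1 ∧
      (∀ j, j < m + 1 →
        ((List.range' 1 m).foldl (pvKmpStep s) ([0], 0)).1.getD j 0 = pvMB s (j + 1)) ∧
      ((List.range' 1 m).foldl (pvKmpStep s) ([0], 0)).2 = pvMB s (m + 1) := by
  intro m
  induction m with
  | zero =>
      intro _
      refine ⟨rfl, ?_, ?_⟩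
      · intro j hj
        have hj0 : j = 0 := by omega
        subst hj0
        simp [pvMB, Nat.findGreatest_zero]
      · simp [pvMB, Nat.findGreatest_zero]
  | succ m ih =>
      intro hm
      obtain ⟨ih1, ih2, ih3⟩ := ih (by omega)
      rw [List.range'_1_concat, List.foldl_append, List.foldl_cons, List.foldl_nil]
      set st := (List.range' 1 m).foldl (pvKmpStep s) ([0], 0) with hst
      have hie : (1 + m) = m + 1 := by omega
      have hi : m + 1 < s.length := by omega
      have := pvKmpStep_inv s (m + 1) (by omega) hi st.1 st.2 ih1 ih2 ih3
      rw [hie]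
      exact this

theorem pvKmpBorder_eq (s : List Char) (hs : s ≠ []) : pvKmpBorder s = pvMB s s.length := by
  have hlen : 1 ≤ s.length := List.length_pos_of_ne_nil hs
  unfold pvKmpBorder
  rw [if_neg (by simpa [List.isEmpty_iff] using hs)]
  obtain ⟨h1, h2, h3⟩ := pvKmp_fold s hlen (s.length - 1) le_rfl
  set st := (List.range' 1 (s.length - 1)).foldl (pvKmpStep s) ([0], 0) with hst
  have hne : st.1 ≠ [] := by
    intro h
    rw [h] at h1
    simp at h1
  have hlast : st.1.getLastD 0 = st.1.getD (st.1.length - 1) 0 := by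
    rw [List.getLastD_eq_getLast?, List.getLast?_eq_getElem?]
    rfl
  rw [hlast, h1]
  have := h2 (s.length - 1) (by omega)
  rw [show s.length - 1 + 1 - 1 = s.length - 1 from by omega, this,
    show s.length - 1 + 1 = s.length from by omega]

theorem pv_sep_border_iff (p t : List Char) (hp : pvSep ∉ p) (ht : pvSep ∉ t) (j : Nat) :
    pvBord (p ++ pvSep :: t) (p ++ pvSep :: t).length j ↔
      j ≤ p.length ∧ j ≤ t.length ∧ p.take j <:+ t := by
  have hlen : (p ++ pvSep :: t).length = p.length + t.length + 1 := by simp; omega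
  have hsep_at : ∀ (h : p.length < (p ++ pvSep :: t).length),
      (p ++ pvSep :: t)[p.length] = pvSep := by
    intro h
    rw [List.getElem_append_right (le_refl p.length)]
    simp
  have hpos : ∀ m (h : m < (p ++ pvSep :: t).length), (p ++ pvSep :: t)[m] = pvSep →
      m = p.length := by
    intro m h hm
    rcases lt_trichotomy m p.length with h1 | h1 | h1
    · exfalso
      apply hp
      rw [List.getElem_append_left h1] at hm
      exact hm ▸ List.getElem_mem _
    · exact h1
    · exfalso
      apply ht
      have h2 : p.length ≤ m := le_of_lt h1
      have hm' : (pvSep :: t)[m - p.length]'(by simp [hlen] at h ⊢; omega) = pvSep := by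
        rw [← List.getElem_append_right h2]
        exact hm
      obtain ⟨q, hq2⟩ : ∃ q, m - p.length = q + 1 := ⟨m - p.length - 1, by omega⟩
      simp only [hq2, List.getElem_cons_succ] at hm'
      exact hm' ▸ List.getElem_mem _
  constructor
  · rintro ⟨hlt, hsuf⟩
    rw [List.take_length] at hsuf
    have hjlen : ((p ++ pvSep :: t).take j).length = j := by simp; omega
    have heq : (p ++ pvSep :: t).take j =
        (p ++ pvSep :: t).drop ((p ++ pvSep :: t).length - j) := by
      have := List.suffix_iff_eq_drop.mp hsuf
      rwa [hjlen] at this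
    have hd1 : 1 ≤ (p ++ pvSep :: t).length - j := by omega
    have hjp : j ≤ p.length := by
      by_contra hcon
      push Not at hcon
      have hidx : p.length < ((p ++ pvSep :: t).take j).length := by omega
      have e3 := List.getElem_of_eq heq hidx
      rw [List.getElem_take] at e3
      rw [List.getElem_drop] at e3
      rw [hsep_at (by omega)] at e3
      have := hpos _ (by omega) e3.symm
      omega
    have hjt : j ≤ t.length := by
      by_contra hcon
      push Not at hcon
      have hdp : (p ++ pvSep :: t).length - j ≤ p.length := by omega
      have hidx : p.length - ((p ++ pvSep :: t).length - j) <
          ((p ++ pvSep :: t).take j).length := by omega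
      have e3 := List.getElem_of_eq heq hidx
      rw [List.getElem_take] at e3
      rw [List.getElem_drop] at e3
      have hix : (p ++ pvSep :: t).length - j +
          (p.length - ((p ++ pvSep :: t).length - j)) = p.length := by omega
      have e4 : (p ++ pvSep :: t)[(p ++ pvSep :: t).length - j +
          (p.length - ((p ++ pvSep :: t).length - j))]'(by omega) = pvSep := by
        simp only [hix]
        exact hsep_at (by omega)
      rw [e4] at e3
      have := hpos _ (by omega) e3
      have hp1 : 1 ≤ p.length := by omega
      omega
    refine ⟨hjp, hjt, ?_⟩
    have htake : (p ++ pvSep :: t).take j = p.take j := List.take_append_of_le_length hjp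
    have htsuf : t <:+ p ++ pvSep :: t :=
      (List.suffix_cons pvSep t).trans (List.suffix_append p _)
    have := List.suffix_of_suffix_length_le hsuf htsuf (by omega)
    rwa [htake] at this
  · rintro ⟨h1, h2, h3⟩
    refine ⟨by omega, ?_⟩
    rw [List.take_length, List.take_append_of_le_length h1]
    exact h3.trans ((List.suffix_cons pvSep t).trans (List.suffix_append p _))

theorem pv_findGreatest_restrict (P Q : Nat → Prop) [DecidablePred P] [DecidablePred Q]
    (u n : Nat) (hun : u ≤ n) (hiff : ∀ j, Q j ↔ (j ≤ u ∧ P j)) :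
    Nat.findGreatest Q n = Nat.findGreatest P u := by
  rw [Nat.findGreatest_eq_iff]
  obtain ⟨hle, hP0, hmax⟩ := (Nat.findGreatest_eq_iff (P := P) (k := u)).mp rfl
  refine ⟨hle.trans hun, ?_, ?_⟩
  · intro h0
    rw [hiff]
    exact ⟨hle, hP0 h0⟩
  · intro n' hlt hle' hQ
    rw [hiff] at hQ
    exact absurd (Nat.le_findGreatest hQ.1 hQ.2) (by omega)

theorem pvAFind_eq_findGreatest (merged nxt : List Char) (u : Nat) :
    pvAFind merged nxt (PySem.List.pyRange (u : Int) 0 (-1)) =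
      ((Nat.findGreatest (fun L => nxt.take L <:+ merged) u : Nat) : Int) := by
  induction u with
  | zero =>
      rw [PySem.List.pyRange_neg_one_eq_nil (by norm_num)]
      simp [pvAFind]
  | succ u ih =>
      rw [PySem.List.pyRange_neg_one_cons (by positivity)]
      simp only [pvAFind]
      have hslice : PySem.Chars.slice nxt none (some ((u + 1 : Nat) : Int)) =
          nxt.take (u + 1) := PySem.List.slice_to_natCast nxt (u + 1)
      have htail : ((u + 1 : Nat) : Int) - 1 = ((u : Nat) : Int) := by push_cast; ring
      rw [hslice, htail, Nat.findGreatest_succ]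
      by_cases h : nxt.take (u + 1) <:+ merged
      · rw [if_pos (by rw [PySem.Chars.endswith_iff]; exact h), if_pos h]
      · rw [if_neg (by rw [PySem.Chars.endswith_iff]; exact h), if_neg h]
        exact ih

theorem pv_mem_slice_from {c : Char} (l : List Char) (a : Int)
    (h : c ∈ PySem.Chars.slice l (some a) none) : c ∈ l := by
  simp only [PySem.Chars.slice] at h
  rcases lt_or_ge a 0 with ha | ha
  · rw [show a = -(((-a).toNat : Nat) : Int) from by omega,
      PySem.List.slice_from_neg_natCast _ _ (by omega)] at h
    exact List.mem_of_mem_drop h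
  · rw [show a = ((a.toNat : Nat) : Int) from (Int.toNat_of_nonneg ha).symm,
      PySem.List.slice_from_natCast] at h
    exact List.mem_of_mem_drop h

theorem pv_step_eq (mo : Int) (merged nxt : List Char) (hm : pvSep ∉ merged)
    (hn : pvSep ∉ nxt) : pvBStep mo merged nxt = pvAStep mo merged nxt := by
  by_cases hnil : nxt = []
  · simp [pvBStep, pvAStep, hnil]
  · simp only [pvBStep, pvAStep, if_neg hnil]
    suffices h : (((if 0 < min (min (merged.length : Int) (nxt.length : Int)) mo then
        pvKmpBorder (PySem.Chars.slice nxt none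
            (some (min (min (merged.length : Int) (nxt.length : Int)) mo)) ++
          pvSep :: PySem.Chars.slice merged
            (some ((merged.length : Int) - min (min (merged.length : Int) (nxt.length : Int)) mo))
            none)
        else 0 : Nat) : Int)) =
        pvAFind merged nxt
          (PySem.List.pyRange (min (min (merged.length : Int) (nxt.length : Int)) mo) 0 (-1)) by
      rw [h]
    set upper := min (min (merged.length : Int) (nxt.length : Int)) mo with hup
    by_cases hpos : 0 < upper
    · rw [if_pos hpos]
      set u := upper.toNat with hu
      have hup_eq : (u : Int) = upper := Int.toNat_of_nonneg (le_of_lt hpos)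
      have hM : upper ≤ (merged.length : Int) := (min_le_left _ _).trans (min_le_left _ _)
      have hN : upper ≤ (nxt.length : Int) := (min_le_left _ _).trans (min_le_right _ _)
      have hu1 : 1 ≤ u := by omega
      have huM : u ≤ merged.length := by omega
      have huN : u ≤ nxt.length := by omega
      have hslice1 : PySem.Chars.slice nxt none (some upper) = nxt.take u := by
        rw [← hup_eq]
        simp only [PySem.Chars.slice]
        exact PySem.List.slice_to_natCast nxt u
      have hslice2 : PySem.Chars.slice merged (some ((merged.length : Int) - upper)) none =
          merged.drop (merged.length - u) := by
        rw [show (merged.length : Int) - upper = ((merged.length - u : Nat) : Int) from by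
          push_cast [huM]; omega]
        simp only [PySem.Chars.slice]
        exact PySem.List.slice_from_natCast merged (merged.length - u)
      rw [hslice1, hslice2]
      have hpp : pvSep ∉ nxt.take u := fun h => hn (List.mem_of_mem_take h)
      have htt : pvSep ∉ merged.drop (merged.length - u) := fun h => hm (List.mem_of_mem_drop h)
      have hppl : (nxt.take u).length = u := by simp; omega
      have httl : (merged.drop (merged.length - u)).length = u := by simp; omega
      rw [pvKmpBorder_eq _ (by simp)]
      have hiff : ∀ jj, pvBord (nxt.take u ++ pvSep :: merged.drop (merged.length - u))
          (nxt.take u ++ pvSep :: merged.drop (merged.length - u)).length jj ↔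
          (jj ≤ u ∧ nxt.take jj <:+ merged) := by
        intro jj
        rw [pv_sep_border_iff _ _ hpp htt jj]
        constructor
        · rintro ⟨ha, hb, hc⟩
          refine ⟨by omega, ?_⟩
          have he : (nxt.take u).take jj = nxt.take jj := by
            rw [List.take_take]
            congr 1
            omega
          rw [he] at hc
          exact hc.trans (List.drop_suffix _ _)
        · rintro ⟨ha, hb⟩
          refine ⟨by omega, by omega, ?_⟩
          have h1 : nxt.take jj <:+ merged.drop (merged.length - u) := by
            apply List.suffix_of_suffix_length_le hb (List.drop_suffix _ _)
            simp [httl]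
            omega
          have he : (nxt.take u).take jj = nxt.take jj := by
            rw [List.take_take]
            congr 1
            omega
          rw [he]
          exact h1
      unfold pvMB
      rw [pv_findGreatest_restrict (fun L => nxt.take L <:+ merged) _ u _
        (by simp [hppl, httl]) hiff]
      rw [← hup_eq, pvAFind_eq_findGreatest]
    · rw [if_neg hpos]
      rw [PySem.List.pyRange_neg_one_eq_nil (by omega)]
      simp [pvAFind]

theorem pvAStep_sep (mo : Int) (merged nxt : List Char) (hm : pvSep ∉ merged)
    (hn : pvSep ∉ nxt) : pvSep ∉ pvAStep mo merged nxt := by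
  intro hmem
  unfold pvAStep at hmem
  by_cases hnil : nxt = []
  · rw [if_pos hnil] at hmem
    exact hm hmem
  · rw [if_neg hnil] at hmem
    simp only [List.mem_append] at hmem
    rcases hmem with h | h
    · exact hm h
    · exact hn (pv_mem_slice_from nxt _ h)

theorem pv_fold_eq (mo : Int) (l : List (List Char)) :
    ∀ merged, pvSep ∉ merged → (∀ x ∈ l, pvSep ∉ x) →
      l.foldl (fun m n => pvBStep mo m n) merged =
        l.foldl (fun m n => pvAStep mo m n) merged := by
  induction l with
  | nil => intro merged _ _; rfl
  | cons x l ih =>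
      intro merged hmerged hl
      simp only [List.foldl_cons]
      rw [pv_step_eq mo merged x hmerged (hl x List.mem_cons_self)]
      exact ih _ (pvAStep_sep mo merged x hmerged (hl x List.mem_cons_self))
        (fun y hy => hl y (List.mem_cons_of_mem _ hy))

-- ===== VERDICT (by name: the statement is the Claim_ definition above) =====
theorem merge_with_overlap_py_spec : Claim_equal_merge_with_overlap_py := by
  intro pieces mo hdom
  unfold Spec_merge_with_overlap_py
  cases pieces with
  | nil => rfl
  | cons p rest =>
      have hgood : ∀ x ∈ (p :: rest), pvSep ∉ x.toList := by
        intro x hx hc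
        unfold Dom_merge_with_overlap_py at hdom
        simp only [Bool.and_eq_true, List.all_eq_true] at hdom
        have := hdom.1 x hx
        unfold pvDomStr at this
        rw [List.all_eq_true] at this
        have := this _ hc
        unfold pvDomChar at this
        simp only [Bool.or_eq_true, Bool.and_eq_true, decide_eq_true_eq, beq_iff_eq] at this
        have hsep : pvSep.toNat = 0 := by decide
        omega
      simp only [merge_with_overlap_py, merge_with_overlap_py_alt]
      rw [pv_fold_eq mo (rest.map String.toList) p.toList
        (hgood p (List.mem_cons_self))
        (by intro x hx
            rw [List.mem_map] at hx
            obtain ⟨y, hy, rfl⟩ := hx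
            exact hgood y (List.mem_cons_of_mem _ hy))]
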